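-- pv_equiv track=rewrite | github.com/GustosRepo/medocr | MEDOCR/ocr-worker/backend_integration.py | _compute_status_from_flags
-- ===== SOURCE A (Python) =====
-- def _compute_status_from_flags(flags: list) -> str:
--     flags = flags or []
--     high_review = {
--         'WRONG_TEST_ORDERED', 'TITRATION_REQUIRES_CLINICAL_REVIEW', 'INSURANCE_NOT_ACCEPTED',
--         'PROMINENCE_CONTRACT_ENDED', 'NOT_REFERRAL_DOCUMENT', 'DME_MENTIONED', 'PEDIATRIC_SPECIAL_HANDLING'
--     }
--     action_flags = {
--         'MISSING_PATIENT_INFO', 'INSURANCE_EXPIRED', 'AUTHORIZATION_REQUIRED', 'MISSING_CHART_NOTES',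
--         'NO_TEST_ORDER_FOUND', 'LOW_OCR_CONFIDENCE', 'CONTRADICTORY_INFO'
--     }
--     if any(f in flags for f in high_review):
--         return 'additional_review_required'
--     if any(f in flags for f in action_flags):
--         return 'additional_actions_required'
--     return 'ready_to_schedule'
-- ===== SOURCE B (Python) =====
-- HIGH_REVIEW = (
--     'WRONG_TEST_ORDERED', 'TITRATION_REQUIRES_CLINICAL_REVIEW', 'INSURANCE_NOT_ACCEPTED',
--     'PROMINENCE_CONTRACT_ENDED', 'NOT_REFERRAL_DOCUMENT', 'DME_MENTIONED', 'PEDIATRIC_SPECIAL_HANDLING'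
-- )
-- ACTION_FLAGS = (
--     'MISSING_PATIENT_INFO', 'INSURANCE_EXPIRED', 'AUTHORIZATION_REQUIRED', 'MISSING_CHART_NOTES',
--     'NO_TEST_ORDER_FOUND', 'LOW_OCR_CONFIDENCE', 'CONTRADICTORY_INFO'
-- )
--
-- def _compute_status_from_flags(flags: list) -> str:
--     has_high = False
--     has_action = False
--     for f in (flags or []):
--         if f in HIGH_REVIEW:
--             has_high = True
--         elif f in ACTION_FLAGS:
--             has_action = True
--     if has_high:
--         return 'additional_review_required'
--     if has_action:
--         return 'additional_actions_required'
--     return 'ready_to_schedule'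
-- ===== Notes on version B (the rewrite author's own statement) =====
-- stated objective: alternative
-- what changed: Replaces A's two sequential any()-scans over the priority sets (each doing a membership test into the flags list) with a single pass over the flags themselves that maintains two booleans and decides the status afterwards.
import Mathlib
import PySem

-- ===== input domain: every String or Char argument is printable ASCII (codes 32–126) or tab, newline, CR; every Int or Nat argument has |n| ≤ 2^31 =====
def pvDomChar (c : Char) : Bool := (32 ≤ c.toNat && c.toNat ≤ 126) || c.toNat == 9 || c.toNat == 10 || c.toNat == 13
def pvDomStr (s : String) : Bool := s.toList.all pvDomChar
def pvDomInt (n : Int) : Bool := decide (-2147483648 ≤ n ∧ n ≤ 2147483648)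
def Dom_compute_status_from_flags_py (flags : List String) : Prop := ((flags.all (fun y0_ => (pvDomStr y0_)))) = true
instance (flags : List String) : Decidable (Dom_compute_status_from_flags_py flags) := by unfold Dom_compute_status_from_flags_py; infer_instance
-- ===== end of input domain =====

-- B replaces A's two any()-scans over the priority sets by one pass over the flags
-- maintaining two booleans (objective: alternative decomposition, same cost class).

-- ===== PORT A =====
-- the two set literals of A, as PySem.Set (elements distinct, written order)
def pvHighA : PySem.Set String := PySem.Set.ofList
  ["WRONG_TEST_ORDERED", "TITRATION_REQUIRES_CLINICAL_REVIEW", "INSURANCE_NOT_ACCEPTED",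
   "PROMINENCE_CONTRACT_ENDED", "NOT_REFERRAL_DOCUMENT", "DME_MENTIONED", "PEDIATRIC_SPECIAL_HANDLING"]
def pvActionA : PySem.Set String := PySem.Set.ofList
  ["MISSING_PATIENT_INFO", "INSURANCE_EXPIRED", "AUTHORIZATION_REQUIRED", "MISSING_CHART_NOTES",
   "NO_TEST_ORDER_FOUND", "LOW_OCR_CONFIDENCE", "CONTRADICTORY_INFO"]

def compute_status_from_flags_py (flags : List String) : String :=
  let flags := if flags.isEmpty then [] else flags   -- flags = flags or []
  if pvHighA.any (fun f => flags.contains f) then "additional_review_required"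
  else if pvActionA.any (fun f => flags.contains f) then "additional_actions_required"
  else "ready_to_schedule"

-- ===== PORT B =====
-- module-level tuples of Source B
def pvHighB : List String :=
  ["WRONG_TEST_ORDERED", "TITRATION_REQUIRES_CLINICAL_REVIEW", "INSURANCE_NOT_ACCEPTED",
   "PROMINENCE_CONTRACT_ENDED", "NOT_REFERRAL_DOCUMENT", "DME_MENTIONED", "PEDIATRIC_SPECIAL_HANDLING"]
def pvActionB : List String :=
  ["MISSING_PATIENT_INFO", "INSURANCE_EXPIRED", "AUTHORIZATION_REQUIRED", "MISSING_CHART_NOTES",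
   "NO_TEST_ORDER_FOUND", "LOW_OCR_CONFIDENCE", "CONTRADICTORY_INFO"]

-- the loop body of Source B: if f in HIGH: has_high=True elif f in ACTION: has_action=True
def pvStepB (st : Bool × Bool) (f : String) : Bool × Bool :=
  if pvHighB.contains f then (true, st.2)
  else if pvActionB.contains f then (st.1, true)
  else st

def compute_status_from_flags_py_alt (flags : List String) : String :=
  let fl := if flags.isEmpty then [] else flags      -- flags or []
  let st := fl.foldl pvStepB (false, false)
  if st.1 then "additional_review_required"
  else if st.2 then "additional_actions_required"
  else "ready_to_schedule"

-- ===== PRECONDITION & SPEC =====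
def Spec_compute_status_from_flags_py (flags : List String) (out : String) : Prop := out = compute_status_from_flags_py_alt flags
instance (flags : List String) (out : String) : Decidable (Spec_compute_status_from_flags_py flags out) := by unfold Spec_compute_status_from_flags_py; infer_instance

-- ===== CLAIM (what is proved, stated in full; the proofs are below) =====
def Claim_equal_compute_status_from_flags_py : Prop := ∀ (flags : List String), Dom_compute_status_from_flags_py flags → Spec_compute_status_from_flags_py flags (compute_status_from_flags_py flags)

-- ===== LEMMAS AND PROOFS =====

-- closed form of B's fold: the two booleans after the loop
theorem pvFold_closed (fs : List String) (h a : Bool) :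
    fs.foldl pvStepB (h, a) =
      (h || fs.any (fun f => pvHighB.contains f),
       a || fs.any (fun f => !pvHighB.contains f && pvActionB.contains f)) := by
  induction fs generalizing h a with
  | nil => simp
  | cons x xs ih =>
    by_cases h1 : x ∈ pvHighB
    · simp [List.foldl_cons, pvStepB, List.contains_eq_mem, h1, ih]
    · by_cases h2 : x ∈ pvActionB <;>
        simp [List.foldl_cons, pvStepB, List.contains_eq_mem, h1, h2, ih]

-- existence swap: scanning the set for a member of flags = scanning flags for a member of the set
theorem pvSwap (s flags : List String) :
    s.any (fun f => flags.contains f) = flags.any (fun f => s.contains f) := by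
  rw [Bool.eq_iff_iff]
  simp only [List.any_eq_true, List.contains_eq_mem, decide_eq_true_eq]
  constructor <;> rintro ⟨x, hx, hy⟩ <;> exact ⟨x, hy, hx⟩

-- ===== VERDICT (by name: the statement is the Claim_ definition above) =====
theorem compute_status_from_flags_py_spec : Claim_equal_compute_status_from_flags_py := by
  unfold Claim_equal_compute_status_from_flags_py
  intro flags _
  unfold Spec_compute_status_from_flags_py
  simp only [compute_status_from_flags_py, compute_status_from_flags_py_alt]
  have hH : pvHighA = pvHighB := by decide
  have hA : pvActionA = pvActionB := by decide
  generalize (if flags.isEmpty = true then [] else flags) = fl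
  rw [pvFold_closed, hH, hA]
  dsimp only
  rw [Bool.false_or, Bool.false_or, ← pvSwap pvHighB fl]
  by_cases hh : pvHighB.any (fun f => fl.contains f) = true
  · rw [if_pos hh, if_pos hh]
  · rw [if_neg hh, if_neg hh]
    have hfalse : fl.any (fun f => pvHighB.contains f) = false := by
      rw [← pvSwap pvHighB fl]; simpa using hh
    have heq : (fl.any fun f => !pvHighB.contains f && pvActionB.contains f)
        = pvActionB.any (fun f => fl.contains f) := by
      rw [pvSwap pvActionB fl, Bool.eq_iff_iff]
      simp only [List.any_eq_true, List.contains_eq_mem, Bool.and_eq_true,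
        Bool.not_eq_eq_eq_not, Bool.not_true, decide_eq_false_iff_not, decide_eq_true_eq]
      constructor
      · rintro ⟨f, hf, hp⟩
        exact ⟨f, hf, hp.2⟩
      · rintro ⟨f, hf, hp⟩
        refine ⟨f, hf, ?_, hp⟩
        intro hmem
        have : fl.any (fun g => pvHighB.contains g) = true :=
          List.any_eq_true.mpr ⟨f, hf, by simpa [List.contains_eq_mem] using hmem⟩
        rw [hfalse] at this
        exact Bool.false_ne_true this
    rw [heq]
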